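-- pv_equiv track=rewrite | github.com/aadithpm/leetcode | OA/Twitter/WaitingTime.py | waitingTime
-- ===== SOURCE A (Python) =====
-- def waitingTime(tickets, p):
--     total = tickets[p]
--     for idx, person in enumerate(tickets):
--         if idx != p:
--             if person < tickets[p]:
--                 total += person
--             else:
--                 total += tickets[p]
--                 if idx > p:
--                     total -= 1
--     return total
-- ===== SOURCE B (Python) =====
-- def waitingTime(tickets, p):
--     mine = tickets[p]
--     order = sorted(tickets)
--     n = len(order)
--     i = 0
--     total = 0
--     while i < n and order[i] < mine:
--         total += order[i]
--         i += 1
--     total += (n - i) * mine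
--     for t in tickets[p+1:]:
--         if t >= mine:
--             total -= 1
--     return total
-- ===== Notes on version B (the rewrite author's own statement) =====
-- stated objective: alternative
-- what changed: Replaces A's single index-conditioned enumerate loop with a sort-then-scan algorithm: sort a copy of the queue, accumulate the sorted prefix strictly below tickets[p] in a while loop that stops at the first element >= tickets[p], add the remaining block in closed form as (n-i)*tickets[p], then subtract one per element >= tickets[p] in the suffix after p.
-- outside the precondition, e.g. on waitingTime([2, 3], -1): A returns 7, B returns 4; on waitingTime([1, 2], 5): A raises IndexError, B raises IndexError
import Mathlib
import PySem

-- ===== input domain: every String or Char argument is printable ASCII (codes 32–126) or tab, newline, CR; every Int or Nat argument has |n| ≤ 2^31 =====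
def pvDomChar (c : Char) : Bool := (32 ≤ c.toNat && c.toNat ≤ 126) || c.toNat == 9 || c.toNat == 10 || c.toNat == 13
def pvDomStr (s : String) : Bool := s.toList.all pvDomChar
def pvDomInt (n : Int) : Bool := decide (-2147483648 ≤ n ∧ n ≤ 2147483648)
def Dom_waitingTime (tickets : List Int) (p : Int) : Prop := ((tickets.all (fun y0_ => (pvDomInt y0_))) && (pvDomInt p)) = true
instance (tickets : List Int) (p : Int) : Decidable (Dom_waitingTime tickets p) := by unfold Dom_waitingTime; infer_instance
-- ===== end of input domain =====

-- B recomputes the waiting time by sorting a copy of the queue, scanning the sorted prefix below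
-- tickets[p], adding the remaining block in closed form, and subtracting one per later element
-- >= tickets[p], instead of A's index-conditioned enumerate loop (objective: alternative).


-- ===== PORT A =====
-- the body of A's for-loop over enumerate(tickets)
def waitingTimeStep (tp p : Int) (total : Int) (x : Int × Int) : Int :=
  if x.1 ≠ p then
    if x.2 < tp then total + x.2
    else
      let total := total + tp
      if x.1 > p then total - 1 else total
  else total

def waitingTime (tickets : List Int) (p : Int) : Int :=
  let tp := (PySem.List.pyGet? tickets p).getD 0   -- tickets[p]; none (IndexError) excluded by Pre_
  (PySem.List.enumerate tickets 0).foldl (waitingTimeStep tp p) tp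

-- ===== PORT B =====
-- Source B's while loop: walk the sorted list while the element is < mine, accumulating it; at the
-- first element ≥ mine stop and add the remaining block as (n - i) * mine in closed form
def bScan (mine total : Int) : List Int → Int
  | [] => total
  | t :: rest =>
      if t < mine then bScan mine (total + t) rest
      else total + ((t :: rest).length : Int) * mine

-- Source B's for loop over tickets[p+1:]: subtract 1 per element ≥ mine
def bSuffix (mine total : Int) : List Int → Int
  | [] => total
  | t :: rest => bSuffix mine (if mine ≤ t then total - 1 else total) rest

-- mine = tickets[p] (none = IndexError, excluded by Pre_); order = sorted(tickets)
def waitingTime_alt (tickets : List Int) (p : Int) : Int :=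
  bSuffix ((PySem.List.pyGet? tickets p).getD 0)
    (bScan ((PySem.List.pyGet? tickets p).getD 0) 0 (PySem.List.sorted tickets (fun x => x) false))
    (PySem.List.slice tickets (some (p + 1)) none)

-- ===== PRECONDITION & SPEC =====
-- Pre_ excludes p ≥ len(tickets), where A raises IndexError, and negative p, where A's value is an
-- accident of Python's negative-index wraparound combined with A's 'idx != p' test never firing.
def Pre_waitingTime (tickets : List Int) (p : Int) : Prop := 0 ≤ p ∧ p < tickets.length
instance (tickets : List Int) (p : Int) : Decidable (Pre_waitingTime tickets p) := by unfold Pre_waitingTime; infer_instance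

def pvWitness_waitingTime : List Int × Int := ([2, 6, 3, 4, 5], 2)

def Spec_waitingTime (tickets : List Int) (p : Int) (out : Int) : Prop := out = waitingTime_alt tickets p
instance (tickets : List Int) (p : Int) (out : Int) : Decidable (Spec_waitingTime tickets p out) := by unfold Spec_waitingTime; infer_instance

-- ===== CLAIM (what is proved, stated in full; the proofs are below) =====
def Claim_equal_waitingTime : Prop := ∀ (tickets : List Int) (p : Int), Dom_waitingTime tickets p → Pre_waitingTime tickets p → Spec_waitingTime tickets p (waitingTime tickets p)

-- ===== LEMMAS AND PROOFS =====

-- enumerate distributes over append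
theorem enumerate_append {α : Type} (xs ys : List α) (s : Int) :
    PySem.List.enumerate (xs ++ ys) s
      = PySem.List.enumerate xs s ++ PySem.List.enumerate ys (s + xs.length) := by
  induction xs generalizing s with
  | nil => simp [PySem.List.enumerate_nil]
  | cons a xs ih =>
      simp only [List.cons_append, PySem.List.enumerate_cons, ih, List.length_cons]
      have harg : s + 1 + ((xs.length : Nat) : Int) = s + (((xs.length + 1 : Nat) : Nat) : Int) := by
        push_cast
        ring
      rw [harg]

-- A's loop, prefix part: every index is < p, so each element contributes min t tp
theorem foldA_prefix (tp p s acc : Int) (l : List Int) (h : s + l.length ≤ p) :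
    (PySem.List.enumerate l s).foldl (waitingTimeStep tp p) acc
      = acc + (l.map (fun t => min t tp)).sum := by
  induction l generalizing s acc with
  | nil => simp [PySem.List.enumerate_nil]
  | cons t l ih =>
      simp only [PySem.List.enumerate_cons, List.foldl_cons, List.map_cons, List.sum_cons]
      have hs : s < p := by
        have := h; simp only [List.length_cons] at this; push_cast at this; omega
      have hstep : waitingTimeStep tp p acc (s, t) = acc + min t tp := by
        unfold waitingTimeStep
        by_cases hlt : t < tp
        · simp [hs.ne, hlt, min_eq_left hlt.le]
        · simp [hs.ne, hlt, not_lt.mp hlt, hs.not_gt]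
      rw [hstep, ih (s + 1) _ (by simp only [List.length_cons] at h; push_cast at h ⊢; omega)]
      ring

-- A's loop, suffix part: every index is > p, so each element contributes min t tp minus 1 when tp ≤ t
theorem foldA_suffix (tp p s acc : Int) (l : List Int) (h : p < s) :
    (PySem.List.enumerate l s).foldl (waitingTimeStep tp p) acc
      = acc + (l.map (fun t => min t tp)).sum - (l.countP (fun t => tp ≤ t) : Int) := by
  induction l generalizing s acc with
  | nil => simp [PySem.List.enumerate_nil]
  | cons t l ih =>
      simp only [PySem.List.enumerate_cons, List.foldl_cons, List.map_cons, List.sum_cons,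
        List.countP_cons]
      have hstep : waitingTimeStep tp p acc (s, t)
          = acc + min t tp - (if tp ≤ t then 1 else 0) := by
        unfold waitingTimeStep
        by_cases hlt : t < tp
        · simp [h.ne', hlt, min_eq_left hlt.le, not_le.mpr hlt]
        · simp [h.ne', hlt, not_lt.mp hlt, h]
      rw [hstep, ih (s + 1) _ (by omega)]
      push_cast
      simp only [decide_eq_true_eq]
      split_ifs <;> ring

-- the p-th element itself is skipped by A's loop
theorem step_self (tp p acc t : Int) : waitingTimeStep tp p acc (p, t) = acc := by
  unfold waitingTimeStep; simp

-- A computes sum(min(t, a)) - #{later elements ≥ a} when p points at the element a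
theorem waitingTime_formula (l1 l2 : List Int) (a : Int) :
    waitingTime (l1 ++ a :: l2) ((l1.length : Int))
      = ((l1 ++ a :: l2).map (fun t => min t a)).sum - (l2.countP (fun t => a ≤ t) : Int) := by
  have hget : (PySem.List.pyGet? (l1 ++ a :: l2) ((l1.length : Int))).getD 0 = a := by
    rw [show (PySem.List.pyGet? (l1 ++ a :: l2) ((l1.length : Int))).getD 0
        = PySem.List.pyGetD (l1 ++ a :: l2) ((l1.length : Int)) 0 from rfl,
      PySem.List.pyGetD_natCast]
    simp [List.getD]
  unfold waitingTime
  rw [hget]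
  rw [enumerate_append, List.foldl_append, PySem.List.enumerate_cons, List.foldl_cons]
  simp only [zero_add]
  rw [foldA_prefix a (l1.length : Int) 0 a l1 (by omega), step_self,
    foldA_suffix a (l1.length : Int) ((l1.length : Int) + 1) _ l2 (by omega)]
  simp only [List.map_append, List.sum_append, List.map_cons, List.sum_cons, min_self]
  ring

-- if every element of l is ≥ mine, summing min over l is just length * mine
theorem map_min_const (mine : Int) (l : List Int) (h : ∀ x ∈ l, mine ≤ x) :
    (l.map (fun x => min x mine)).sum = (l.length : Int) * mine := by
  induction l with
  | nil => simp
  | cons t rest ih =>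
      simp only [List.map_cons, List.sum_cons, List.length_cons,
        ih (fun x hx => h x (List.mem_cons_of_mem _ hx)),
        min_eq_right (h t (List.mem_cons_self))]
      push_cast
      ring

-- Source B's while loop on a sorted list equals the sum of mins: once an element ≥ mine is seen,
-- sortedness makes every remaining min equal to mine, which the closed-form block accounts for
theorem bScan_eq (mine total : Int) (l : List Int) (h : l.Pairwise (· ≤ ·)) :
    bScan mine total l = total + (l.map (fun x => min x mine)).sum := by
  induction l generalizing total with
  | nil => simp [bScan]
  | cons t rest ih =>
      rcases List.pairwise_cons.mp h with ⟨hall, hrest⟩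
      by_cases hlt : t < mine
      · rw [show bScan mine total (t :: rest) = bScan mine (total + t) rest by
          simp [bScan, hlt], ih _ hrest]
        simp only [List.map_cons, List.sum_cons, min_eq_left hlt.le]
        ring
      · have hge : mine ≤ t := not_lt.mp hlt
        have hsum : ((t :: rest).map (fun x => min x mine)).sum
            = ((t :: rest).length : Int) * mine :=
          map_min_const mine (t :: rest) (by
            intro x hx
            rcases List.mem_cons.mp hx with rfl | hx
            · exact hge
            · exact hge.trans (hall x hx))
        rw [show bScan mine total (t :: rest) = total + ((t :: rest).length : Int) * mine by
          simp [bScan, hlt], hsum]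

-- Source B's suffix loop subtracts the count of elements ≥ mine
theorem bSuffix_eq (mine total : Int) (l : List Int) :
    bSuffix mine total l = total - (l.countP (fun t => mine ≤ t) : Int) := by
  induction l generalizing total with
  | nil => simp [bSuffix]
  | cons t rest ih =>
      simp only [bSuffix, ih, List.countP_cons, decide_eq_true_eq]
      by_cases h : mine ≤ t <;> simp only [h, if_true, if_false] <;> push_cast <;> omega

-- B computes the same closed form on every input
theorem waitingTime_alt_formula (tickets : List Int) (p : Int) :
    waitingTime_alt tickets p
      = (tickets.map (fun t => min t ((PySem.List.pyGet? tickets p).getD 0))).sum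
        - ((PySem.List.slice tickets (some (p + 1)) none).countP
            (fun t => (PySem.List.pyGet? tickets p).getD 0 ≤ t) : Int) := by
  unfold waitingTime_alt
  rw [bScan_eq _ _ _ (PySem.List.sorted_pairwise tickets (fun x => x) ), bSuffix_eq]
  have hperm : (PySem.List.sorted tickets (fun x => x) false).Perm tickets :=
    PySem.List.sorted_perm tickets (fun x => x) false
  rw [(hperm.map _).sum_eq]
  ring_nf

-- ===== VERDICT (by name: the statement is the Claim_ definition above) =====
theorem waitingTime_spec : Claim_equal_waitingTime := by
  intro tickets p _ hpre
  obtain ⟨h0, hlt⟩ := hpre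
  unfold Spec_waitingTime
  have hplt : p.toNat < tickets.length := by omega
  have hdecomp : tickets = tickets.take p.toNat ++ tickets[p.toNat] :: tickets.drop (p.toNat + 1) := by
    rw [List.getElem_cons_drop, List.take_append_drop]
  have hlen : ((tickets.take p.toNat).length : Int) = p := by
    simp; omega
  have key := waitingTime_formula (tickets.take p.toNat) (tickets.drop (p.toNat + 1))
    tickets[p.toNat]
  rw [hlen, ← hdecomp] at key
  have hget : (PySem.List.pyGet? tickets p).getD 0 = tickets[p.toNat] := by
    have h2 : ((p.toNat : Nat) : Int) = p := by omega
    rw [show (PySem.List.pyGet? tickets p).getD 0 = PySem.List.pyGetD tickets p 0 from rfl]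
    conv_lhs => rw [← h2, PySem.List.pyGetD_natCast]
    simp [List.getD, hplt]
  have hslice : PySem.List.slice tickets (some (p + 1)) none = tickets.drop (p.toNat + 1) := by
    rw [PySem.List.slice_from tickets (by omega : (0:Int) ≤ p + 1)]
    congr 1
    omega
  rw [waitingTime_alt_formula, hget, hslice, key]
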